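-- pv_equiv track=rewrite | github.com/yimgao/OmniDoc | backend/src/utils/document_organizer.py | organize_documents_by_level
-- ===== SOURCE A (Python) =====
-- from typing import Dict, List, Tuple, Optional
-- from enum import Enum
--
-- class DocumentLevel(str, Enum):
--     """Document levels"""
--     LEVEL_1_STRATEGIC = "Level 1: Strategic (Entrepreneur)"
--     LEVEL_2_PRODUCT = "Level 2: Product (Product Manager)"
--     LEVEL_3_TECHNICAL = "Level 3: Technical (Programmer)"
--     CROSS_LEVEL = "Cross-Level (Everyone)"
--
-- DOCUMENT_LEVEL_MAPPING = {
--     # Level 1: Strategic (Entrepreneur)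
--     "requirements": DocumentLevel.LEVEL_1_STRATEGIC,
--     "requirements_analyst": DocumentLevel.LEVEL_1_STRATEGIC,
--     "stakeholder_documentation": DocumentLevel.LEVEL_1_STRATEGIC,
--     "stakeholder_communication": DocumentLevel.LEVEL_1_STRATEGIC,
--     "project_charter": DocumentLevel.LEVEL_1_STRATEGIC,
--     "business_model": DocumentLevel.LEVEL_1_STRATEGIC,
--     "marketing_plan": DocumentLevel.LEVEL_1_STRATEGIC,
--
--     # Level 2: Product (Product Manager)
--     "pm_documentation": DocumentLevel.LEVEL_2_PRODUCT,
--     "user_stories": DocumentLevel.LEVEL_2_PRODUCT,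
--     "wbs_agent": DocumentLevel.LEVEL_2_PRODUCT,
--     "work_breakdown_structure": DocumentLevel.LEVEL_2_PRODUCT,
--
--     # Level 3: Technical (Programmer)
--     "technical_documentation": DocumentLevel.LEVEL_3_TECHNICAL,
--     "api_documentation": DocumentLevel.LEVEL_3_TECHNICAL,
--     "database_schema": DocumentLevel.LEVEL_3_TECHNICAL,
--     "setup_guide": DocumentLevel.LEVEL_3_TECHNICAL,
--     "legal_compliance": DocumentLevel.LEVEL_3_TECHNICAL,
--
--     # Cross-Level (Everyone)
--     "developer_documentation": DocumentLevel.CROSS_LEVEL,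
--     "user_documentation": DocumentLevel.CROSS_LEVEL,
--     "test_documentation": DocumentLevel.CROSS_LEVEL,
--     "support_playbook": DocumentLevel.CROSS_LEVEL,
--     "quality_reviewer": DocumentLevel.CROSS_LEVEL,
--     "format_converter": DocumentLevel.CROSS_LEVEL,
--     "claude_cli_documentation": DocumentLevel.CROSS_LEVEL,
-- }
--
-- def get_document_level(doc_type: str) -> DocumentLevel:
--     """
--     Get the level for a document type
--
--     Args:
--         doc_type: Document type identifier
--
--     Returns:
--         DocumentLevel enum value
--     """
--     # Normalize doc_type (remove underscores, lowercase)
--     normalized = doc_type.lower().replace('_', '').replace('-', '')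
--
--     # Try direct match first
--     if doc_type in DOCUMENT_LEVEL_MAPPING:
--         return DOCUMENT_LEVEL_MAPPING[doc_type]
--
--     # Try normalized match
--     for key, level in DOCUMENT_LEVEL_MAPPING.items():
--         key_normalized = key.lower().replace('_', '').replace('-', '')
--         if key_normalized == normalized:
--             return level
--
--     # Default to cross-level if not found
--     return DocumentLevel.CROSS_LEVEL
--
-- def organize_documents_by_level(files: Dict[str, str]) -> Dict[DocumentLevel, List[Tuple[str, str]]]:
--     """
--     Organize documents by level
--
--     Args:
--         files: Dictionary mapping document types to file paths
--
--     Returns: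
--         Dictionary mapping DocumentLevel to list of (doc_type, file_path) tuples
--     """
--     organized = {
--         DocumentLevel.LEVEL_1_STRATEGIC: [],
--         DocumentLevel.LEVEL_2_PRODUCT: [],
--         DocumentLevel.LEVEL_3_TECHNICAL: [],
--         DocumentLevel.CROSS_LEVEL: [],
--     }
--
--     for doc_type, file_path in files.items():
--         level = get_document_level(doc_type)
--         organized[level].append((doc_type, file_path))
--
--     return organized
-- ===== SOURCE B (Python) =====
-- from typing import Dict, List, Tuple
-- from enum import Enum
--
-- class DocumentLevel(str, Enum):
--     """Document levels"""
--     LEVEL_1_STRATEGIC = "Level 1: Strategic (Entrepreneur)"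
--     LEVEL_2_PRODUCT = "Level 2: Product (Product Manager)"
--     LEVEL_3_TECHNICAL = "Level 3: Technical (Programmer)"
--     CROSS_LEVEL = "Cross-Level (Everyone)"
--
-- DOCUMENT_LEVEL_MAPPING = {
--     "requirements": DocumentLevel.LEVEL_1_STRATEGIC,
--     "requirements_analyst": DocumentLevel.LEVEL_1_STRATEGIC,
--     "stakeholder_documentation": DocumentLevel.LEVEL_1_STRATEGIC,
--     "stakeholder_communication": DocumentLevel.LEVEL_1_STRATEGIC,
--     "project_charter": DocumentLevel.LEVEL_1_STRATEGIC,
--     "business_model": DocumentLevel.LEVEL_1_STRATEGIC,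
--     "marketing_plan": DocumentLevel.LEVEL_1_STRATEGIC,
--     "pm_documentation": DocumentLevel.LEVEL_2_PRODUCT,
--     "user_stories": DocumentLevel.LEVEL_2_PRODUCT,
--     "wbs_agent": DocumentLevel.LEVEL_2_PRODUCT,
--     "work_breakdown_structure": DocumentLevel.LEVEL_2_PRODUCT,
--     "technical_documentation": DocumentLevel.LEVEL_3_TECHNICAL,
--     "api_documentation": DocumentLevel.LEVEL_3_TECHNICAL,
--     "database_schema": DocumentLevel.LEVEL_3_TECHNICAL,
--     "setup_guide": DocumentLevel.LEVEL_3_TECHNICAL,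
--     "legal_compliance": DocumentLevel.LEVEL_3_TECHNICAL,
--     "developer_documentation": DocumentLevel.CROSS_LEVEL,
--     "user_documentation": DocumentLevel.CROSS_LEVEL,
--     "test_documentation": DocumentLevel.CROSS_LEVEL,
--     "support_playbook": DocumentLevel.CROSS_LEVEL,
--     "quality_reviewer": DocumentLevel.CROSS_LEVEL,
--     "format_converter": DocumentLevel.CROSS_LEVEL,
--     "claude_cli_documentation": DocumentLevel.CROSS_LEVEL,
-- }
--
-- def _normalize(s: str) -> str:
--     return s.lower().replace('_', '').replace('-', '')
--
-- # Precomputed once: normalized key -> level (first occurrence wins; none actually collide).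
-- _NORMALIZED_MAP = {}
-- for _k, _lvl in DOCUMENT_LEVEL_MAPPING.items():
--     _nk = _normalize(_k)
--     if _nk not in _NORMALIZED_MAP:
--         _NORMALIZED_MAP[_nk] = _lvl
--
-- def organize_documents_by_level(files: Dict[str, str]) -> Dict[DocumentLevel, List[Tuple[str, str]]]:
--     tagged = [(t, p, _NORMALIZED_MAP.get(_normalize(t), DocumentLevel.CROSS_LEVEL))
--               for t, p in files.items()]
--     return {
--         level: [(t, p) for t, p, lvl in tagged if lvl == level]
--         for level in (DocumentLevel.LEVEL_1_STRATEGIC, DocumentLevel.LEVEL_2_PRODUCT,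
--                       DocumentLevel.LEVEL_3_TECHNICAL, DocumentLevel.CROSS_LEVEL)
--     }
-- ===== Notes on version B (the rewrite author's own statement) =====
-- stated objective: simpler
-- what changed: B precomputes a module-level normalized-key->level dict once (first occurrence wins), replacing A's per-call exact-match branch plus linear normalize-and-scan over the mapping with a single O(1) lookup, and builds the four buckets by filtering a once-tagged list instead of appending into a dict inside the loop.
import Mathlib
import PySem

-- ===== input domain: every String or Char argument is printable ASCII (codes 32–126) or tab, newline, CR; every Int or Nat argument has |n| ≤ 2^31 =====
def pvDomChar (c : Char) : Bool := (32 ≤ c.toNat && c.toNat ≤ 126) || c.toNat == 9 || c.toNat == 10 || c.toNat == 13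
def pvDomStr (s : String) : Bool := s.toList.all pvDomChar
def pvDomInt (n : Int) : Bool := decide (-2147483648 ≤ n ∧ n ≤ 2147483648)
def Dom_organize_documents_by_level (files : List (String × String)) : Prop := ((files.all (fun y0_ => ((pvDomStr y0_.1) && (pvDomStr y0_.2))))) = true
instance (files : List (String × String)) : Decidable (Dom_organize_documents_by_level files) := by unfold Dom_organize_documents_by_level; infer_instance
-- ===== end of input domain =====

-- B replaces A's per-call normalize-and-scan lookup with a module-level precomputed
-- normalized-key dict and builds the four buckets by filtering a once-tagged list
-- instead of appending into a dict inside the loop (objective: simpler/faster lookups).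

-- ===== PORT A =====
def pvL1 : String := "Level 1: Strategic (Entrepreneur)"
def pvL2 : String := "Level 2: Product (Product Manager)"
def pvL3 : String := "Level 3: Technical (Programmer)"
def pvCross : String := "Cross-Level (Everyone)"

-- DOCUMENT_LEVEL_MAPPING (module-level dict literal, shared data of both programs)
def pvMapping : PySem.Dict String String := PySem.Dict.mk [
  ("requirements", pvL1), ("requirements_analyst", pvL1),
  ("stakeholder_documentation", pvL1), ("stakeholder_communication", pvL1),
  ("project_charter", pvL1), ("business_model", pvL1), ("marketing_plan", pvL1),
  ("pm_documentation", pvL2), ("user_stories", pvL2), ("wbs_agent", pvL2),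
  ("work_breakdown_structure", pvL2),
  ("technical_documentation", pvL3), ("api_documentation", pvL3),
  ("database_schema", pvL3), ("setup_guide", pvL3), ("legal_compliance", pvL3),
  ("developer_documentation", pvCross), ("user_documentation", pvCross),
  ("test_documentation", pvCross), ("support_playbook", pvCross),
  ("quality_reviewer", pvCross), ("format_converter", pvCross),
  ("claude_cli_documentation", pvCross)]

-- doc_type.lower().replace('_', '').replace('-', '')  (shared normalization expression)
def pvNorm (s : String) : String :=
  PySem.Str.replace (PySem.Str.replace (PySem.Str.lower s) "_" "") "-" ""

-- A's for-loop over DOCUMENT_LEVEL_MAPPING.items() with early return, then the default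
def pvScanA (normalized : String) : List (String × String) → String
  | [] => pvCross
  | (k, l) :: rest => if pvNorm k = normalized then l else pvScanA normalized rest

-- get_document_level (A's version: exact-match branch, then the scan)
def pvGetLevelA (doc_type : String) : String :=
  let normalized := pvNorm doc_type
  match PySem.Dict.get? pvMapping doc_type with
  | some l => l
  | none => pvScanA normalized pvMapping.items

def organize_documents_by_level (files : List (String × String)) : List (String × List (String × String)) :=
  let organized : PySem.Dict String (List (String × String)) :=
    PySem.Dict.mk [(pvL1, []), (pvL2, []), (pvL3, []), (pvCross, [])]
  (files.foldl (fun org tp =>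
      org.modify (pvGetLevelA tp.1) [] (fun xs => xs ++ [tp])) organized).items

-- ===== PORT B =====
-- _NORMALIZED_MAP: built once from the mapping, first occurrence wins
def pvNormMap : PySem.Dict String String :=
  pvMapping.items.foldl (fun d p =>
    if d.contains (pvNorm p.1) then d else d.insert (pvNorm p.1) p.2) PySem.Dict.empty

def pvGetLevelB (doc_type : String) : String :=
  pvNormMap.getD (pvNorm doc_type) pvCross

def organize_documents_by_level_alt (files : List (String × String)) : List (String × List (String × String)) :=
  let tagged := files.map (fun tp => (tp.1, tp.2, pvGetLevelB tp.1))
  [pvL1, pvL2, pvL3, pvCross].map (fun level =>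
    (level, (tagged.filter (fun x => x.2.2 == level)).map (fun x => (x.1, x.2.1))))

-- ===== PRECONDITION & SPEC =====
def Spec_organize_documents_by_level (files : List (String × String)) (out : List (String × List (String × String))) : Prop := out = organize_documents_by_level_alt files
instance (files : List (String × String)) (out : List (String × List (String × String))) : Decidable (Spec_organize_documents_by_level files out) := by unfold Spec_organize_documents_by_level; infer_instance

-- ===== CLAIM (what is proved, stated in full; the proofs are below) =====
def Claim_equal_organize_documents_by_level : Prop := ∀ (files : List (String × String)), Dom_organize_documents_by_level files → Spec_organize_documents_by_level files (organize_documents_by_level files)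

-- ===== LEMMAS AND PROOFS =====

-- A's scan over a list of (key, level) pairs is first-match lookup in the normalized list
theorem pvScanA_eq_lookup (l : List (String × String)) (s : String) :
    pvScanA s l = ((PySem.Dict.mk (l.map fun p => (pvNorm p.1, p.2))).get? s).getD pvCross := by
  induction l with
  | nil => simp [pvScanA, PySem.Dict.get?]
  | cons p rest ih =>
    obtain ⟨k, v⟩ := p
    simp only [pvScanA, List.map_cons, PySem.Dict.get?_mk_cons]
    by_cases h : pvNorm k = s
    · simp [h]
    · simp [h, ih, beq_eq_false_iff_ne.mpr h]

-- B's precomputed map is exactly the normalized mapping list (no normalized keys collide)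
theorem pvNormMap_eq :
    pvNormMap = PySem.Dict.mk (pvMapping.items.map fun p => (pvNorm p.1, p.2)) := by
  decide

-- B's lookup agrees with A's get_document_level on every string
set_option maxRecDepth 16384 in
theorem getLevel_eq (t : String) : pvGetLevelA t = pvGetLevelB t := by
  unfold pvGetLevelA
  cases h : PySem.Dict.get? pvMapping t with
  | none =>
    simp only [pvGetLevelB, pvScanA_eq_lookup, pvNormMap_eq, PySem.Dict.getD_eq_get?_getD]
  | some l =>
    have hm := PySem.Dict.mem_items_of_get?_eq_some _ h
    have hall : pvMapping.items.all (fun p =>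
        (PySem.Dict.mk (pvMapping.items.map fun q => (pvNorm q.1, q.2))).getD (pvNorm p.1) pvCross == p.2) = true := by
      decide
    have := List.all_eq_true.mp hall _ hm
    simp only [pvGetLevelB, pvNormMap_eq]
    exact (eq_of_beq this).symm

-- A's level is always one of the four bucket keys
set_option maxRecDepth 16384 in
theorem getLevelA_mem (t : String) : pvGetLevelA t ∈ [pvL1, pvL2, pvL3, pvCross] := by
  rw [getLevel_eq]
  unfold pvGetLevelB
  rw [pvNormMap_eq, PySem.Dict.getD_eq_get?_getD]
  cases h : PySem.Dict.get? (PySem.Dict.mk (pvMapping.items.map fun q => (pvNorm q.1, q.2))) (pvNorm t) with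
  | none => simp
  | some l =>
    have hm := PySem.Dict.mem_items_of_get?_eq_some _ h
    have hall : (PySem.Dict.mk (pvMapping.items.map fun q => (pvNorm q.1, q.2))).items.all
        (fun p => decide (p.2 ∈ [pvL1, pvL2, pvL3, pvCross])) = true := by decide
    simpa using List.all_eq_true.mp hall _ hm

-- the fold's buckets: getD at any key is the initial bucket plus the filtered suffix
theorem foldl_modify_getD (l : List (String × String)) (d : PySem.Dict String (List (String × String))) (c : String) :
    (l.foldl (fun org tp => org.modify (pvGetLevelA tp.1) [] (fun xs => xs ++ [tp])) d).getD c []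
      = d.getD c [] ++ (l.filter (fun tp => pvGetLevelA tp.1 == c)) := by
  induction l generalizing d with
  | nil => simp
  | cons tp rest ih =>
    simp only [List.foldl_cons, List.filter_cons, ih, PySem.Dict.getD_modify]
    by_cases h : c = pvGetLevelA tp.1
    · simp [h]
    · simp [h, beq_eq_false_iff_ne.mpr (fun hb => h hb.symm)]

-- the fold never adds a key: every level hit is already a key
theorem foldl_modify_keys (l : List (String × String)) (d : PySem.Dict String (List (String × String)))
    (hd : ∀ t, pvGetLevelA t ∈ d.keys) :
    (l.foldl (fun org tp => org.modify (pvGetLevelA tp.1) [] (fun xs => xs ++ [tp])) d).keys = d.keys := by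
  induction l generalizing d with
  | nil => rfl
  | cons tp rest ih =>
    have hc : d.contains (pvGetLevelA tp.1) = true :=
      (PySem.Dict.contains_iff_mem_keys d _).mpr (hd tp.1)
    have hk : (d.modify (pvGetLevelA tp.1) [] (fun xs => xs ++ [tp])).keys = d.keys := by
      rw [PySem.Dict.keys_modify, PySem.Dict.keys_insert_of_contains _ _ hc]
    rw [List.foldl_cons, ih _ (fun t => hk ▸ hd t), hk]

-- ===== VERDICT (by name: the statement is the Claim_ definition above) =====
theorem organize_documents_by_level_spec : Claim_equal_organize_documents_by_level := by
  intro files _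
  unfold Spec_organize_documents_by_level organize_documents_by_level organize_documents_by_level_alt
  have hd : ∀ t, pvGetLevelA t ∈
      (PySem.Dict.mk [(pvL1, ([] : List (String × String))), (pvL2, []), (pvL3, []), (pvCross, [])]).keys := by
    intro t; simpa [PySem.Dict.keys_mk] using getLevelA_mem t
  have hkeys := foldl_modify_keys files _ hd
  have hnd : (files.foldl (fun org tp => org.modify (pvGetLevelA tp.1) [] (fun xs => xs ++ [tp]))
      (PySem.Dict.mk [(pvL1, ([] : List (String × String))), (pvL2, []), (pvL3, []), (pvCross, [])])).keys.Nodup := by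
    rw [hkeys]; decide
  rw [PySem.Dict.items_eq_map_keys _ hnd ([] : List (String × String)), hkeys]
  have hfour : (PySem.Dict.mk [(pvL1, ([] : List (String × String))), (pvL2, []), (pvL3, []), (pvCross, [])]).keys
      = [pvL1, pvL2, pvL3, pvCross] := by decide
  rw [hfour]
  apply List.map_congr_left
  intro k hk
  rw [foldl_modify_getD]
  have hinit : (PySem.Dict.mk [(pvL1, ([] : List (String × String))), (pvL2, []), (pvL3, []), (pvCross, [])]).getD k []
      = [] := by
    fin_cases hk <;> decide
  rw [hinit, List.nil_append]
  simp only [List.filter_map, List.map_map, Function.comp_def]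
  simp [getLevel_eq]
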